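-- pv_equiv track=rewrite | github.com/kyle-98/AdventOfCode | 2021/day_3/oxygen_co2_rating.py | oxygenRating
-- ===== SOURCE A (Python) =====
-- def oxygenRating(binList, oxygen, n):
-- 	bits = {"0" : 0, "1" : 0}
-- 	if len(binList) == 1:
-- 		oxygen = binList[0]
-- 		return int(oxygen, 2)
--
-- 	else:
-- 		if n == 8:
-- 			n == 7
-- 		for i in range(len(binList)):
-- 			if "0" in binList[i][n]:
-- 				if("0" in bits):
-- 					bits["0"] += 1
-- 				else:
-- 					bits["0"] = 1
-- 			else:
-- 				if("1" in bits):
-- 					bits["1"] += 1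
-- 				else:
-- 					bits["1"] = 1
-- 		if bits["0"] == bits["1"]:
-- 			for x in range(len(binList)):
-- 				if "0" in binList[x][n]:
-- 					binList[x] = "R"
-- 		elif bits["0"] > bits["1"]:
-- 			for j in range(len(binList)):
-- 				if binList[j][n] == "1":
-- 					binList[j] = "R"
-- 		else:
-- 			for j in range(len(binList)):
-- 				if binList[j][n] == "0":
-- 					binList[j] = "R"
--
-- 		binList = list(filter(lambda a: a != "R", binList))
-- 		return (oxygenRating(binList, oxygen, n + 1))
-- ===== SOURCE B (Python) =====
-- def oxygenRating(binList, oxygen, n):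
--     # Return-value re-implementation: convert each string to an integer once, then
--     # filter integers by bit tests (A mutates the caller's list at the top level; B does not).
--     L = len(binList[0])
--     vals = [int(s, 2) for s in binList]
--     while len(vals) > 1:
--         p = 1 << (L - 1 - n)
--         ones = [v for v in vals if v // p % 2 == 1]
--         zeros = [v for v in vals if v // p % 2 != 1]
--         vals = ones if len(ones) >= len(zeros) else zeros
--         n += 1
--     return vals[0]
-- ===== Notes on version B (the rewrite author's own statement) =====
-- stated objective: alternative
-- what changed: B converts every string to an integer once with int(s,2) and then filters a list of integers by arithmetic bit tests (v // (1 << (L-1-n)) % 2) in an iterative while loop, instead of A's recursion over string lists with a bits-dict count, three mark-as-"R" passes and a filter; B does not mutate the caller's list (equivalence is about the return value).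
-- outside the precondition, e.g. on oxygenRating(['R', '1', 'R'], '1', 0): A returns 1, B raises ValueError; on oxygenRating(['0', '1'], 'x', -1): A returns 1, B returns 1; on oxygenRating(['1_0'], 'x', 0): A returns 2, B returns 2
import Mathlib
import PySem

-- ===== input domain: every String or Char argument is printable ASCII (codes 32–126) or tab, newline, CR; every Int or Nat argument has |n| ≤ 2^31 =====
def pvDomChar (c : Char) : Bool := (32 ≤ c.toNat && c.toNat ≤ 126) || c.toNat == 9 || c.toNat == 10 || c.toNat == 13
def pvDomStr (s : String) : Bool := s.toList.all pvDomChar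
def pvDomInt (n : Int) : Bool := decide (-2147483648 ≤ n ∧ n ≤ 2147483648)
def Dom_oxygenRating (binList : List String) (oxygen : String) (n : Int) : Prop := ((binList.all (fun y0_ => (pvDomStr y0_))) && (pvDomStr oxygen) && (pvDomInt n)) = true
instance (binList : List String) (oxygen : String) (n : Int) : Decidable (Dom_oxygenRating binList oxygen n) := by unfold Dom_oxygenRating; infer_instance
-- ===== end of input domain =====

-- B converts each string to an integer once and filters a list of integers by arithmetic bit
-- tests in an iterative loop, replacing A's recursion over string lists (bits-dict count,
-- mark-"R" passes, filter); equivalence is about the RETURN value only: A marks entries of the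
-- caller's list as "R" in place at the top level, B does not mutate.


-- ===== PORT A =====
-- int(s, 2): exact for the nonempty all-'0'/'1' strings Pre_ admits (no signs/spaces/underscores)
def pvBin (s : String) : Int :=
  s.toList.foldl (fun acc c => 2 * acc + (if c == '1' then 1 else 0)) 0

-- the bits-dict counting loop of A: (bits["0"], bits["1"]); none = IndexError at the first bad access
-- (A's `if n == 8: n == 7` is a no-op — the comparison's value is discarded — and is not ported)
def pvCountA (l : List String) (n : Int) (b0 b1 : Int) : Option (Int × Int) :=
  match l with
  | [] => some (b0, b1)
  | s :: t =>
    match PySem.List.pyGet? s.toList n with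
    | none => none
    | some c => if c == '0' then pvCountA t n (b0 + 1) b1 else pvCountA t n b0 (b1 + 1)

-- one of A's three marking loops: entries whose n-th char satisfies p become "R"
def pvMarkA (l : List String) (n : Int) (p : Char → Bool) : Option (List String) :=
  match l with
  | [] => some []
  | s :: t =>
    match PySem.List.pyGet? s.toList n with
    | none => none
    | some c => (pvMarkA t n p).map (fun r => (if p c then "R" else s) :: r)

-- A's recursion, with fuel as a totality guard only (never exhausted on Pre_ inputs);
-- a `none` (Python raise) yields junk 0, which Pre_ excludes
def pvLoopA (fuel : Nat) (l : List String) (n : Int) : Int :=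
  match fuel with
  | 0 => 0
  | fuel + 1 =>
    if l.length = 1 then pvBin (l.headD "")
    else
      match pvCountA l n 0 0 with
      | none => 0
      | some (b0, b1) =>
        let marked :=
          if b0 = b1 then pvMarkA l n (· == '0')
          else if b0 > b1 then pvMarkA l n (· == '1')
          else pvMarkA l n (· == '0')
        match marked with
        | none => 0
        | some m => pvLoopA fuel (m.filter (· != "R")) (n + 1)

def oxygenRating (binList : List String) (oxygen : String) (n : Int) : Int :=
  pvLoopA ((binList.headD "").length + 1) binList n

-- ===== PORT B =====
-- v // p % 2 of Source B
def pvBit (v p : Int) : Int := PySem.Int.mod (PySem.Int.floordiv v p) 2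

-- the while loop of Source B over the integer list (fuel = totality guard, never exhausted on Pre_
-- inputs; `1 << k` with k < 0, where Python raises, is clamped — Pre_ keeps the shift nonnegative)
def pvLoopV (fuel : Nat) (vals : List Int) (L : Int) (pos : Int) : Int :=
  match fuel with
  | 0 => 0
  | fuel + 1 =>
    if vals.length > 1 then
      let p : Int := 1 <<< (L - 1 - pos).toNat
      let ones := vals.filter (fun v => pvBit v p == 1)
      let zeros := vals.filter (fun v => pvBit v p != 1)
      pvLoopV fuel (if ones.length ≥ zeros.length then ones else zeros) L (pos + 1)
    else vals.headD 0

def oxygenRating_alt (binList : List String) (oxygen : String) (n : Int) : Int :=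
  pvLoopV ((binList.headD "").length + 1) (binList.map pvBin)
    ((binList.headD "").toList.length : Int) n

-- ===== PRECONDITION & SPEC =====
-- Pre_ restricts to the natural AoC domain: a nonempty list of equal-length nonempty '0'/'1'
-- strings and, unless the list is a singleton, 0 ≤ n < L with pairwise-distinct suffixes from n
-- (otherwise A runs past the strings and raises IndexError). This is narrower than A's exact
-- returning set: A also returns on inputs containing the literal string "R" (its own sentinel,
-- which it silently deletes), via negative-index wraparound, via int(_,2) leniency
-- (underscores/whitespace) and on some unequal-length lists — accidental cases with no closed
-- form, on which B either returns the same value or raises (see cites).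
def Pre_oxygenRating (binList : List String) (oxygen : String) (n : Int) : Prop :=
  binList ≠ [] ∧
  0 < (binList.headD "").toList.length ∧
  (∀ s ∈ binList, s.toList.length = (binList.headD "").toList.length) ∧
  (binList.all (fun s => s.toList.all (fun c => c == '0' || c == '1'))) = true ∧
  (binList.length = 1 ∨
    (0 ≤ n ∧ n < ((binList.headD "").toList.length : Int) ∧
      (binList.map (fun s => s.toList.drop n.toNat)).Nodup))

instance (binList : List String) (oxygen : String) (n : Int) : Decidable (Pre_oxygenRating binList oxygen n) := by
  unfold Pre_oxygenRating; infer_instance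

def pvWitness_oxygenRating : List String × String × Int := (["10", "01"], "x", 0)

def Spec_oxygenRating (binList : List String) (oxygen : String) (n : Int) (out : Int) : Prop := out = oxygenRating_alt binList oxygen n
instance (binList : List String) (oxygen : String) (n : Int) (out : Int) : Decidable (Spec_oxygenRating binList oxygen n out) := by unfold Spec_oxygenRating; infer_instance

-- ===== CLAIM (what is proved, stated in full; the proofs are below) =====
def Claim_equal_oxygenRating : Prop := ∀ (binList : List String) (oxygen : String) (n : Int), Dom_oxygenRating binList oxygen n → Pre_oxygenRating binList oxygen n → Spec_oxygenRating binList oxygen n (oxygenRating binList oxygen n)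


-- ===== LEMMAS AND PROOFS =====

-- the invariant the loop equality maintains (L = common string length)
def pvInv (L : Nat) (l : List String) (pos : Int) : Prop :=
  l ≠ [] ∧ 0 < L ∧
  (∀ s ∈ l, s.toList.length = L ∧ ∀ c ∈ s.toList, c = '0' ∨ c = '1') ∧
  (l.length = 1 ∨
    (0 ≤ pos ∧ pos < (L : Int) ∧ (l.map (fun s => s.toList.drop pos.toNat)).Nodup))

-- the predicate "the pos-th character is '1'"
def pvB1 (pos : Int) (s : String) : Bool := s.toList.getD pos.toNat ' ' == '1'

theorem pvGet_in (l : List Char) (pos : Int) (h0 : 0 ≤ pos) (h1 : pos.toNat < l.length) :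
    PySem.List.pyGet? l pos = some (l.getD pos.toNat ' ') := by
  simp [PySem.List.pyGet?, PySem.List.pyIdx?, h0]
  rw [if_pos (by omega : pos < (l.length : Int))]
  simp [List.getElem?_eq_getElem h1]

theorem pvGetD_mem (l : List Char) (i : Nat) (h : i < l.length) : l.getD i ' ' ∈ l := by
  rw [List.getD_eq_getElem l ' ' h]; exact List.getElem_mem h

-- ----- bit extraction from the folded binary value -----

theorem pvDivShift (t i : Nat) (b cb : Int) (hi : i < t) :
    (cb * 2 ^ t + b) / 2 ^ (t - 1 - i) = cb * 2 ^ (i + 1) + b / 2 ^ (t - 1 - i) := by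
  have hsplit : (2 : Int) ^ t = 2 ^ (i + 1) * 2 ^ (t - 1 - i) := by
    rw [← pow_add]; congr 1; omega
  rw [hsplit, ← mul_assoc, add_comm, Int.add_mul_ediv_right _ _
      (by positivity : (2:Int) ^ (t - 1 - i) ≠ 0)]
  ring

theorem pvBin_acc (l : List Char) (a : Int) :
    l.foldl (fun acc c => 2 * acc + (if c == '1' then 1 else 0)) a
      = a * 2 ^ l.length + l.foldl (fun acc c => 2 * acc + (if c == '1' then 1 else 0)) 0 := by
  induction l generalizing a with
  | nil => simp
  | cons c t ih =>
    simp only [List.foldl_cons, List.length_cons]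
    rw [ih (2 * a + _), ih (2 * 0 + _)]
    ring

theorem pvBin_bounds (l : List Char) :
    0 ≤ l.foldl (fun acc c => 2 * acc + (if c == '1' then 1 else 0)) (0 : Int) ∧
      l.foldl (fun acc c => 2 * acc + (if c == '1' then 1 else 0)) (0 : Int) < 2 ^ l.length := by
  induction l with
  | nil => simp
  | cons c t ih =>
    simp only [List.foldl_cons, List.length_cons]
    rw [pvBin_acc t]
    have h2 : (0 : Int) < 2 ^ t.length := by positivity
    have hcb : (0 : Int) ≤ 2 * 0 + (if c == '1' then 1 else 0) ∧
        (2 * 0 + (if c == '1' then 1 else 0) : Int) ≤ 1 := by split <;> omega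
    constructor
    · nlinarith [ih.1, hcb.1]
    · nlinarith [ih.2, hcb.2, pow_succ (2 : Int) t.length]

theorem pvBit_foldl (l : List Char) (i : Nat) (hi : i < l.length) :
    pvBit (l.foldl (fun acc c => 2 * acc + (if c == '1' then 1 else 0)) 0)
        (2 ^ (l.length - 1 - i))
      = (if l.getD i ' ' == '1' then 1 else 0) := by
  induction l generalizing i with
  | nil => simp at hi
  | cons c t ih =>
    have ht0 := (pvBin_bounds t).1
    have ht1 := (pvBin_bounds t).2
    simp only [List.foldl_cons, List.length_cons]
    rw [pvBin_acc t]
    cases i with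
    | zero =>
      have hlen : t.length + 1 - 1 - 0 = t.length := by omega
      rw [hlen]
      unfold pvBit
      rw [PySem.Int.floordiv_eq_ediv_of_pos (by positivity),
          PySem.Int.mod_eq_emod_of_pos (by omega)]
      rw [add_comm, Int.add_mul_ediv_right _ _ (by positivity : (2:Int) ^ t.length ≠ 0),
          Int.ediv_eq_zero_of_lt ht0 ht1]
      simp only [List.getD_cons_zero]
      split <;> decide
    | succ i =>
      have hi' : i < t.length := by simpa using hi
      have hd : (0 : Int) < 2 ^ (t.length - 1 - i) := by positivity
      have hlen : t.length + 1 - 1 - (i + 1) = t.length - 1 - i := by omega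
      rw [hlen]
      unfold pvBit
      rw [PySem.Int.floordiv_eq_ediv_of_pos hd, PySem.Int.mod_eq_emod_of_pos (by omega)]
      rw [pvDivShift t.length i _ _ hi']
      have ih' := ih i hi'
      unfold pvBit at ih'
      rw [PySem.Int.floordiv_eq_ediv_of_pos hd, PySem.Int.mod_eq_emod_of_pos (by omega)] at ih'
      rw [List.getD_cons_succ, ← ih']
      have heven : (2 : Int) ∣ (2 * 0 + (if c == '1' then 1 else 0)) * 2 ^ (i + 1) :=
        Dvd.dvd.mul_left (dvd_pow_self 2 (Nat.succ_ne_zero i)) _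
      omega

-- pvBit of pvBin s at the loop's shift, as the character test
theorem pvBit_pvBin (s : String) (L : Nat) (pos : Int) (hs : s.toList.length = L)
    (h0 : 0 ≤ pos) (hL : pos < (L : Int)) :
    pvBit (pvBin s) (1 <<< ((L : Int) - 1 - pos).toNat)
      = (if pvB1 pos s then 1 else 0) := by
  have hk : ((L : Int) - 1 - pos).toNat = s.toList.length - 1 - pos.toNat := by omega
  have hsh : ((1 <<< ((L : Int) - 1 - pos).toNat : Nat) : Int)
      = 2 ^ (s.toList.length - 1 - pos.toNat) := by
    rw [Nat.one_shiftLeft, hk]; push_cast; ring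
  rw [hsh]
  exact pvBit_foldl s.toList pos.toNat (by omega)

-- ----- A's helpers, characterised as filters -----

theorem pvCountA_acc (l : List String) (n : Int) (b0 b1 : Int) :
    pvCountA l n b0 b1 = (pvCountA l n 0 0).map (fun q => (b0 + q.1, b1 + q.2)) := by
  induction l generalizing b0 b1 with
  | nil => simp [pvCountA]
  | cons s t ih =>
    simp only [pvCountA]
    cases hc : PySem.List.pyGet? s.toList n with
    | none => simp
    | some c =>
      by_cases h0 : (c == '0') = true <;> simp only [h0, Bool.false_eq_true, if_true, if_false]
      · rw [ih (b0 + 1) b1, ih (0 + 1) 0, Option.map_map]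
        apply congrFun; apply congrArg; funext q; simp [Prod.ext_iff]; omega
      · rw [ih b0 (b1 + 1), ih 0 (0 + 1), Option.map_map]
        apply congrFun; apply congrArg; funext q; simp [Prod.ext_iff]; omega

theorem pvCountA_eq (l : List String) (pos : Int) (h0 : 0 ≤ pos)
    (hlen : ∀ s ∈ l, pos.toNat < s.toList.length)
    (hbin : ∀ s ∈ l, ∀ c ∈ s.toList, c = '0' ∨ c = '1') :
    pvCountA l pos 0 0 =
      some ((((l.filter (fun s => !pvB1 pos s)).length : Int)),
            (((l.filter (pvB1 pos)).length : Int))) := by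
  induction l with
  | nil => simp [pvCountA]
  | cons s t ih =>
    have hst : pos.toNat < s.toList.length := hlen s (by simp)
    have hc := pvGet_in s.toList pos h0 hst
    have hcb := hbin s (by simp) _ (pvGetD_mem s.toList pos.toNat hst)
    have iht := ih (fun x hx => hlen x (by simp [hx])) (fun x hx => hbin x (by simp [hx]))
    simp only [pvCountA, hc]
    rcases hcb with hcb | hcb
    · have hb : pvB1 pos s = false := by unfold pvB1; rw [hcb]; decide
      rw [hcb, if_pos (by decide : (('0' : Char) == '0') = true), pvCountA_acc, iht]
      simp only [Option.map_some, Option.some.injEq, Prod.mk.injEq, List.filter_cons, hb,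
        Bool.not_false, if_true, List.length_cons, Bool.false_eq_true, if_false]
      push_cast
      omega
    · have hb : pvB1 pos s = true := by unfold pvB1; rw [hcb]; decide
      rw [hcb, if_neg (by decide : ¬ (('1' : Char) == '0') = true), pvCountA_acc, iht]
      simp only [Option.map_some, Option.some.injEq, Prod.mk.injEq, List.filter_cons, hb,
        Bool.not_true, if_true, List.length_cons, Bool.false_eq_true, if_false]
      push_cast
      omega

theorem pvMarkA_filter (l : List String) (pos : Int) (p : Char → Bool) (h0 : 0 ≤ pos)
    (hlen : ∀ s ∈ l, pos.toNat < s.toList.length)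
    (hbin : ∀ s ∈ l, ∀ c ∈ s.toList, c = '0' ∨ c = '1') :
    (pvMarkA l pos p).map (List.filter (· != "R"))
      = some (l.filter (fun s => !p (s.toList.getD pos.toNat ' '))) := by
  induction l with
  | nil => simp [pvMarkA]
  | cons s t ih =>
    have hst : pos.toNat < s.toList.length := hlen s (by simp)
    have hc := pvGet_in s.toList pos h0 hst
    have hcb := hbin s (by simp) _ (pvGetD_mem s.toList pos.toNat hst)
    have hsR : s ≠ "R" := by
      intro hR
      have hmem := pvGetD_mem s.toList pos.toNat hst
      rcases hcb with h | h <;> rw [h] at hmem <;> rw [hR] at hmem <;>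
        revert hmem <;> decide
    have iht := ih (fun x hx => hlen x (by simp [hx])) (fun x hx => hbin x (by simp [hx]))
    simp only [pvMarkA, hc, Option.map_map]
    by_cases hp : p (s.toList.getD pos.toNat ' ') = true
    · simp only [hp, if_true, List.filter_cons]
      norm_num
      cases hm : pvMarkA t pos p with
      | none => rw [hm] at iht; simp at iht
      | some m =>
        rw [hm] at iht
        simpa using iht
    · simp only [hp, Bool.false_eq_true, if_false, List.filter_cons]
      cases hm : pvMarkA t pos p with
      | none => rw [hm] at iht; simp at iht
      | some m =>
        rw [hm] at iht
        simp only [Option.map_some, Option.some.injEq] at iht ⊢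
        simp [hsR, iht]

-- ----- invariant preservation -----

theorem pvConstMap_len_le (l : List String) (f : String → List Char) (v : List Char)
    (hconst : ∀ s ∈ l, f s = v) (hnd : (l.map f).Nodup) : l.length ≤ 1 := by
  match l with
  | [] => simp
  | [a] => simp
  | a :: b :: t =>
    exfalso
    simp only [List.map_cons, List.nodup_cons] at hnd
    exact hnd.1 (by
      rw [hconst a (by simp), hconst b (by simp)]
      exact List.mem_cons_self ..)

theorem pvInv_step (L : Nat) (l : List String) (pos : Int) (keepc : Char)
    (hinv : pvInv L l pos) (h0 : 0 ≤ pos) (hL : pos < (L : Int))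
    (hnd : (l.map (fun s => s.toList.drop pos.toNat)).Nodup)
    (hne : l.filter (fun s => s.toList.getD pos.toNat ' ' == keepc) ≠ []) :
    pvInv L (l.filter (fun s => s.toList.getD pos.toNat ' ' == keepc)) (pos + 1) := by
  obtain ⟨-, hLpos, hall, -⟩ := hinv
  set q : String → Bool := fun s => s.toList.getD pos.toNat ' ' == keepc with hq
  set kept := l.filter q with hkept
  have hmemkeep : ∀ s ∈ kept, s ∈ l ∧ q s = true := by
    intro s hs; exact ⟨List.mem_of_mem_filter hs, List.of_mem_filter hs⟩
  have hallk : ∀ s ∈ kept, s.toList.length = L ∧ ∀ c ∈ s.toList, c = '0' ∨ c = '1' :=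
    fun s hs => hall s (hmemkeep s hs).1
  refine ⟨hne, hLpos, hallk, ?_⟩
  by_cases h1 : kept.length = 1
  · exact Or.inl h1
  · right
    have hndk : (kept.map (fun s => s.toList.drop pos.toNat)).Nodup :=
      List.Nodup.sublist (List.Sublist.map _ List.filter_sublist) hnd
    have hdropc : ∀ s ∈ kept,
        s.toList.drop pos.toNat = keepc :: s.toList.drop (pos.toNat + 1) := by
      intro s hs
      have hlen : pos.toNat < s.toList.length := by
        have := (hallk s hs).1; omega
      have hgd : s.toList.getD pos.toNat ' ' = keepc := by
        have := (hmemkeep s hs).2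
        simpa [hq] using this
      rw [List.drop_eq_getElem_cons hlen, ← List.getD_eq_getElem s.toList ' ' hlen, hgd]
    refine ⟨by omega, ?_, ?_⟩
    · -- pos + 1 < L, else all dropped suffixes are the constant [keepc]
      by_contra hcon
      rw [not_lt] at hcon
      have hconst : ∀ s ∈ kept, s.toList.drop pos.toNat = [keepc] := by
        intro s hs
        rw [hdropc s hs]
        have hlen := (hallk s hs).1
        have : s.toList.drop (pos.toNat + 1) = [] :=
          List.drop_eq_nil_of_le (by omega)
        rw [this]
      have := pvConstMap_len_le kept _ [keepc] hconst hndk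
      have hlen0 : kept ≠ [] := hne
      have : kept.length ≠ 0 := by simpa [List.length_eq_zero_iff] using hlen0
      omega
    · -- nodup of the (pos+1)-suffixes
      have hnat : (pos + 1).toNat = pos.toNat + 1 := by omega
      rw [hnat]
      have hmapc : kept.map (fun s => s.toList.drop pos.toNat)
          = kept.map ((fun t => keepc :: t) ∘ (fun s => s.toList.drop (pos.toNat + 1))) := by
        apply List.map_congr_left
        intro s hs
        exact hdropc s hs
      rw [hmapc, ← List.map_map] at hndk
      exact List.Nodup.of_map _ hndk

-- ----- the loop equality -----

theorem pvLoop_eq (fuel : Nat) (L : Nat) (l : List String) (pos : Int)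
    (hinv : pvInv L l pos) :
    pvLoopA fuel l pos = pvLoopV fuel (l.map pvBin) (L : Int) pos := by
  induction fuel generalizing l pos with
  | zero => rfl
  | succ f ih =>
    obtain ⟨hne, hLpos, hall, hrest⟩ := hinv
    by_cases h1 : l.length = 1
    · rcases l with _ | ⟨s, t⟩
      · simp at h1
      · have ht : t = [] := by simpa using h1
        subst ht
        simp [pvLoopA, pvLoopV]
    · have hlen2 : 1 < l.length := by
        have : l.length ≠ 0 := by simpa [List.length_eq_zero_iff] using hne
        omega
      rcases hrest with h | ⟨hpos0, hposL, hnd⟩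
      · omega
      have hlen' : ∀ s ∈ l, pos.toNat < s.toList.length := by
        intro s hs; have := (hall s hs).1; omega
      have hbin' : ∀ s ∈ l, ∀ c ∈ s.toList, c = '0' ∨ c = '1' :=
        fun s hs => (hall s hs).2
      -- B's two filters over the mapped values are A's filters, mapped
      have hones : (l.map pvBin).filter
            (fun v => pvBit v (1 <<< ((L : Int) - 1 - pos).toNat) == 1)
          = (l.filter (pvB1 pos)).map pvBin := by
        rw [List.filter_map]
        congr 1
        apply List.filter_congr
        intro s hs
        simp only [Function.comp_apply]
        rw [pvBit_pvBin s L pos (hall s hs).1 hpos0 hposL]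
        cases pvB1 pos s <;> simp
      have hzeros : (l.map pvBin).filter
            (fun v => pvBit v (1 <<< ((L : Int) - 1 - pos).toNat) != 1)
          = (l.filter (fun s => !pvB1 pos s)).map pvBin := by
        rw [List.filter_map]
        congr 1
        apply List.filter_congr
        intro s hs
        simp only [Function.comp_apply]
        rw [pvBit_pvBin s L pos (hall s hs).1 hpos0 hposL]
        cases pvB1 pos s <;> simp
      have hsum : l.length
          = (l.filter (pvB1 pos)).length + (l.filter (fun s => !pvB1 pos s)).length :=
        List.length_eq_length_filter_add (pvB1 pos)
      set K1 := l.filter (fun s => s.toList.getD pos.toNat ' ' == '1') with hK1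
      set K0 := l.filter (fun s => s.toList.getD pos.toNat ' ' == '0') with hK0
      have hc10 : l.filter (pvB1 pos) = K1 := rfl
      have hc00 : l.filter (fun s => !pvB1 pos s) = K0 := by
        apply List.filter_congr
        intro s hs
        have hcb := hbin' s hs _ (pvGetD_mem s.toList pos.toNat (hlen' s hs))
        rcases hcb with h | h <;> simp only [pvB1] <;> rw [h] <;> decide
      rw [hc10] at hones hsum
      rw [hc00] at hzeros hsum
      have hne' : ∀ (m : List String), m.length ≠ 0 → m ≠ [] := by
        intro m h hc; subst hc; simp at h
      -- one A-branch, reduced and matched against B's kept list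
      have hbranch : ∀ (p : Char → Bool) (keepc : Char),
          (pvMarkA l pos p).map (List.filter (· != "R"))
            = some (l.filter (fun s => s.toList.getD pos.toNat ' ' == keepc)) →
          (l.filter (fun s => s.toList.getD pos.toNat ' ' == keepc)).length ≠ 0 →
          (match pvMarkA l pos p with
            | none => (0 : Int)
            | some m => pvLoopA f (List.filter (fun x => x != "R") m) (pos + 1))
            = pvLoopV f ((l.filter (fun s => s.toList.getD pos.toNat ' ' == keepc)).map pvBin)
                (L : Int) (pos + 1) := by
        intro p keepc hmk hnz
        cases hm : pvMarkA l pos p with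
        | none => rw [hm] at hmk; simp at hmk
        | some m =>
          rw [hm] at hmk
          simp only [Option.map_some, Option.some.injEq] at hmk
          show pvLoopA f (List.filter (fun x => x != "R") m) (pos + 1) = _
          rw [hmk]
          apply ih
          exact pvInv_step L l pos keepc ⟨hne, hLpos, hall, Or.inr ⟨hpos0, hposL, hnd⟩⟩
            hpos0 hposL hnd (hne' _ hnz)
      have hmark0 : (pvMarkA l pos (· == '0')).map (List.filter (· != "R")) = some K1 := by
        rw [pvMarkA_filter l pos (· == '0') hpos0 hlen' hbin']
        exact congrArg some (List.filter_congr (fun s hs => by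
          have hcb := hbin' s hs _ (pvGetD_mem s.toList pos.toNat (hlen' s hs))
          rcases hcb with h | h <;> rw [h] <;> decide))
      have hmark1 : (pvMarkA l pos (· == '1')).map (List.filter (· != "R")) = some K0 := by
        rw [pvMarkA_filter l pos (· == '1') hpos0 hlen' hbin']
        exact congrArg some (List.filter_congr (fun s hs => by
          have hcb := hbin' s hs _ (pvGetD_mem s.toList pos.toNat (hlen' s hs))
          rcases hcb with h | h <;> rw [h] <;> decide))
      have hcount : pvCountA l pos 0 0 = some (((K0.length : Int)), ((K1.length : Int))) := by
        rw [pvCountA_eq l pos hpos0 hlen' hbin', hc10, hc00]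
      -- unfold one step of both loops
      simp only [pvLoopA, pvLoopV, if_neg h1, List.length_map, if_pos hlen2]
      rw [hcount]
      simp only [hones, hzeros, List.length_map]
      by_cases heq : (K0.length : Int) = (K1.length : Int)
      · rw [if_pos heq, if_pos (show K1.length ≥ K0.length by omega)]
        exact hbranch _ '1' hmark0 (by rw [← hK1]; omega)
      · by_cases hgt : (K0.length : Int) > (K1.length : Int)
        · rw [if_neg heq, if_pos hgt, if_neg (show ¬ K1.length ≥ K0.length by omega)]
          exact hbranch _ '0' hmark1 (by rw [← hK0]; omega)
        · rw [if_neg heq, if_neg hgt, if_pos (show K1.length ≥ K0.length by omega)]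
          exact hbranch _ '1' hmark0 (by rw [← hK1]; omega)

-- ===== VERDICT (by name: the statement is the Claim_ definition above) =====
theorem oxygenRating_spec : Claim_equal_oxygenRating := by
  intro binList oxygen n _ hpre
  unfold Spec_oxygenRating oxygenRating oxygenRating_alt
  obtain ⟨hne, hL, hlen, hbin, hrest⟩ := hpre
  apply pvLoop_eq _ ((binList.headD "").toList.length)
  refine ⟨hne, hL, ?_, hrest⟩
  intro s hs
  refine ⟨hlen s hs, ?_⟩
  intro c hc
  simp only [List.all_eq_true] at hbin
  have h2 := hbin s hs c hc
  simp at h2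
  tauto
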